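-- pv_equiv track=rewrite | github.com/DoctorDoveDragon/Cubit | pedagogical/skill_inference.py | _detect_basic_patterns
-- ===== SOURCE A (Python) =====
-- from typing import Dict, List, Any
--
-- def _detect_basic_patterns(call_history: List[Dict[str, Any]]) -> bool:
--     """Detect basic usage patterns"""
--     if len(call_history) < 3:
--         return False
--
--     # Check for sequential method usage
--     methods = [call['method'] for call in call_history[-10:]]
--
--     # Look for A -> B pattern
--     for i in range(len(methods) - 1):
--         if methods[i] != methods[i + 1]:
--             return True
--
--     return False
-- ===== SOURCE B (Python) =====
-- from typing import Dict, List, Any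
--
-- def _detect_basic_patterns(call_history: List[Dict[str, Any]]) -> bool:
--     """Detect basic usage patterns"""
--     if len(call_history) < 3:
--         return False
--     methods = [call['method'] for call in call_history[-10:]]
--     # some consecutive pair differs  <=>  not all methods identical
--     return len(set(methods)) > 1
-- ===== Notes on version B (the rewrite author's own statement) =====
-- stated objective: simpler
-- what changed: Replaces the index loop over consecutive pairs with a set-cardinality check: the methods differ somewhere iff len(set(methods)) > 1.
import Mathlib
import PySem

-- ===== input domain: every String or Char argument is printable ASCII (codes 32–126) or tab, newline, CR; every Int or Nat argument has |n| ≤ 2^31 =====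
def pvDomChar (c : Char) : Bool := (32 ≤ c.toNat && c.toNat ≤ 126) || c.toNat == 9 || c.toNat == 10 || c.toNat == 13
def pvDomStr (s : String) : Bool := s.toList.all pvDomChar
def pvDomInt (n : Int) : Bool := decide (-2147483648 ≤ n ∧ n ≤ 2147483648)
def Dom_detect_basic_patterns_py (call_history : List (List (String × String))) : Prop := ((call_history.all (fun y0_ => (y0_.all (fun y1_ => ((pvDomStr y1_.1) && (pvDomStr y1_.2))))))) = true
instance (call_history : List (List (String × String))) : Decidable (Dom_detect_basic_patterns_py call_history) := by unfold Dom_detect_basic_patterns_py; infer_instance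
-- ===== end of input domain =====

-- B replaces A's index loop over consecutive pairs by a set-cardinality check (simpler).

-- ===== PORT A =====
-- call['method'] : first-match lookup in the association list; total form with default "",
-- exact on Pre_ (the key is present in every inspected dict there).
def pvMethod (d : List (String × String)) : String := (List.lookup "method" d).getD ""

-- the 'for i in range(len(methods)-1): if methods[i] != methods[i+1]: return True' loop,
-- as the structural pair scan over the same list
def pvScanA : List String → Bool
  | a :: b :: rest => if a ≠ b then true else pvScanA (b :: rest)
  | _ => false

def detect_basic_patterns_py (call_history : List (List (String × String))) : Bool :=
  if call_history.length < 3 then false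
  else
    let methods := (PySem.List.slice call_history (some (-10)) none).map pvMethod
    pvScanA methods

-- ===== PORT B =====
def detect_basic_patterns_py_alt (call_history : List (List (String × String))) : Bool :=
  if call_history.length < 3 then false
  else
    let methods := (PySem.List.slice call_history (some (-10)) none).map pvMethod
    decide (1 < (PySem.Set.ofList methods).length)

-- ===== PRECONDITION & SPEC =====
-- Pre_ excludes exactly the inputs where A raises KeyError: length ≥ 3 with some dict in the
-- last 10 lacking the key "method".
def Pre_detect_basic_patterns_py (call_history : List (List (String × String))) : Prop :=
  call_history.length < 3 ∨
    ∀ d ∈ PySem.List.slice call_history (some (-10)) none, "method" ∈ d.map Prod.fst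
instance (call_history : List (List (String × String))) : Decidable (Pre_detect_basic_patterns_py call_history) := by unfold Pre_detect_basic_patterns_py; infer_instance

def pvWitness_detect_basic_patterns_py : (List (List (String × String))) :=
  [[("method", "a")], [("method", "a")], [("method", "b")]]

def Spec_detect_basic_patterns_py (call_history : List (List (String × String))) (out : Bool) : Prop := out = detect_basic_patterns_py_alt call_history
instance (call_history : List (List (String × String))) (out : Bool) : Decidable (Spec_detect_basic_patterns_py call_history out) := by unfold Spec_detect_basic_patterns_py; infer_instance

-- ===== CLAIM (what is proved, stated in full; the proofs are below) =====
def Claim_equal_detect_basic_patterns_py : Prop := ∀ (call_history : List (List (String × String))), Dom_detect_basic_patterns_py call_history → Pre_detect_basic_patterns_py call_history → Spec_detect_basic_patterns_py call_history (detect_basic_patterns_py call_history)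

-- ===== LEMMAS AND PROOFS =====

-- the pair scan returns true iff some element differs from the head
theorem pvScanA_eq_not_all (a : String) (l : List String) :
    pvScanA (a :: l) = !(l.all (· == a)) := by
  induction l generalizing a with
  | nil => simp [pvScanA]
  | cons b rest ih =>
    by_cases h : a = b
    · subst h
      simp [pvScanA, ih]
    · simp [pvScanA, h, Ne.symm h]

-- the set-cardinality test returns true iff some element differs from the head
theorem pvSet_card_eq_not_all (a : String) (l : List String) :
    decide (1 < (PySem.Set.ofList (a :: l)).length) = !(l.all (· == a)) := by
  by_cases h : l.all (· == a)
  · -- all equal: the set is exactly [a]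
    have hall : ∀ x ∈ a :: l, x = a := by
      intro x hx
      rcases List.mem_cons.mp hx with rfl | hx2
      · rfl
      · exact eq_of_beq (by simpa using (List.all_eq_true.mp h _ hx2))
    have hnd : (PySem.Set.ofList (a :: l)).Nodup := PySem.Set.nodup_ofList _
    have hsub : (PySem.Set.ofList (a :: l)).toFinset ⊆ ({a} : Finset String) := by
      intro x hx
      have hx' := (PySem.Set.mem_ofList _ _).mp (List.mem_toFinset.mp hx)
      simp [hall x hx']
    have hle : (PySem.Set.ofList (a :: l)).length ≤ 1 := by
      rw [← List.toFinset_card_of_nodup hnd]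
      calc (PySem.Set.ofList (a :: l)).toFinset.card
          ≤ ({a} : Finset String).card := Finset.card_le_card hsub
        _ = 1 := Finset.card_singleton a
    simp [h, Nat.not_lt.mpr hle]
  · -- some b ≠ a: both a and b are in the nodup set, so its length is ≥ 2
    have hex : ∃ b ∈ l, ¬ b = a := by simpa using h
    rcases hex with ⟨b, hb, hba⟩
    have ha : a ∈ PySem.Set.ofList (a :: l) := (PySem.Set.mem_ofList _ _).mpr (by simp)
    have hbmem : b ∈ PySem.Set.ofList (a :: l) := (PySem.Set.mem_ofList _ _).mpr (by simp [hb])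
    have hnd : (PySem.Set.ofList (a :: l)).Nodup := PySem.Set.nodup_ofList _
    have hsub : ({a, b} : Finset String) ⊆ (PySem.Set.ofList (a :: l)).toFinset := by
      intro x hx
      rcases Finset.mem_insert.mp hx with rfl | hx2
      · exact List.mem_toFinset.mpr ha
      · rw [Finset.mem_singleton.mp hx2]
        exact List.mem_toFinset.mpr hbmem
    have hcard : 2 ≤ (PySem.Set.ofList (a :: l)).length := by
      have h2 : ({a, b} : Finset String).card = 2 := by
        rw [Finset.card_insert_of_notMem (by simpa using (Ne.symm hba))]
        simp
      calc 2 = ({a, b} : Finset String).card := h2.symm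
        _ ≤ (PySem.Set.ofList (a :: l)).toFinset.card := Finset.card_le_card hsub
        _ = (PySem.Set.ofList (a :: l)).length := List.toFinset_card_of_nodup hnd
    simp only [h, Bool.not_false, decide_eq_true_eq]
    omega

-- ===== VERDICT (by name: the statement is the Claim_ definition above) =====
theorem detect_basic_patterns_py_spec : Claim_equal_detect_basic_patterns_py := by
  intro ch _hdom _hpre
  unfold Spec_detect_basic_patterns_py detect_basic_patterns_py detect_basic_patterns_py_alt
  by_cases hlen : ch.length < 3
  · simp [hlen]
  · simp only [hlen, if_false]
    -- the sliced list is nonempty since length ≥ 3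
    have hnonempty : (PySem.List.slice ch (some (-10)) none).length ≠ 0 := by
      rw [PySem.List.slice_from_neg_ofNat ch 10 (by omega)]
      simp only [List.length_drop]
      omega
    cases hm : (PySem.List.slice ch (some (-10)) none).map pvMethod with
    | nil =>
      exfalso
      apply hnonempty
      have := congrArg List.length hm
      simpa using this
    | cons a l =>
      rw [pvScanA_eq_not_all, pvSet_card_eq_not_all]
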